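-- pv_equiv track=rewrite | github.com/dStass/programming_challenges | HackerRank/wendy_and_bob/largestSubGrid.py | largestSubgrid
-- ===== SOURCE A (Python) =====
-- def largestSubgrid(grid, maxSum):
--     greatestBelowMaxSum = 0
--     mySubGridLen = 0
--     gridLength = len(grid)
--     for subGridLen in range (1, gridLength + 1):
--         for i in range(gridLength + 1 - subGridLen):
--             for j in range(gridLength + 1 - subGridLen):
--                 subGridSum = getSubGridSum(grid, i, j, subGridLen)
--                 if subGridSum >= greatestBelowMaxSum and subGridSum <= maxSum:
--                     greatestBelowMaxSum = subGridSum
--                     mySubGridLen = subGridLen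
--     return mySubGridLen
--
-- def getSubGridSum(grid, x, y, gridLength):
--     if gridLength == 1:
--         return grid[x][y]
--     mySum = 0
--     toAdd = gridLength - 1
--     for j in range(y, y+gridLength):
--         for i in range(x, x+gridLength):
--             mySum += grid[i][j]
--
--
--     return mySum
-- ===== SOURCE B (Python) =====
-- def largestSubgrid(grid, maxSum):
--     # 2D prefix-sum table: each subgrid sum in O(1); same scan order and update rule as the spec.
--     n = len(grid)
--     pref = [[0] * (n + 1)]
--     for row in grid:
--         rp = [0]
--         s = 0
--         for v in row[:n]:
--             s += v
--             rp.append(s)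
--         prev = pref[-1]
--         pref.append([a + b for a, b in zip(prev, rp)])
--     best = 0
--     ans = 0
--     for L in range(1, n + 1):
--         for i in range(n + 1 - L):
--             for j in range(n + 1 - L):
--                 s = pref[i + L][j + L] - pref[i][j + L] - pref[i + L][j] + pref[i][j]
--                 if best <= s <= maxSum:
--                     best = s
--                     ans = L
--     return ans
-- ===== Notes on version B (the rewrite author's own statement) =====
-- stated objective: faster
-- what changed: B precomputes a 2D prefix-sum table so each subgrid sum is four lookups instead of an O(L^2) double loop, keeping A's scan order and running-max update rule.
import Mathlib
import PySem

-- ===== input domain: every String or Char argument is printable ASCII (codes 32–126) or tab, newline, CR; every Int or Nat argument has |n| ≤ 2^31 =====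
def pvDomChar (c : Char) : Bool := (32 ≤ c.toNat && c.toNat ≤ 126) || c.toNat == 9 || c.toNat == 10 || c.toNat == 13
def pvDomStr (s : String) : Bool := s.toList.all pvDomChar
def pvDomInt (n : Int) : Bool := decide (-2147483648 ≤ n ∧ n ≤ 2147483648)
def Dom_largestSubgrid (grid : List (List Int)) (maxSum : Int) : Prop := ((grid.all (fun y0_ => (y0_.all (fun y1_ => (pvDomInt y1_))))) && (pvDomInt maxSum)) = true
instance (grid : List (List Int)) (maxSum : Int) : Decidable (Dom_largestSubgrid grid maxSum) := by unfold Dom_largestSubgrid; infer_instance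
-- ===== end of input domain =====

-- B replaces A's O(L^2) per-subgrid summation loop by a 2D prefix-sum table (four lookups per
-- subgrid), keeping A's scan order and running-max update rule; measured faster (asymptotic).


-- ===== PORT A =====
-- getSubGridSum: grid[x][y] / grid[i][j] are ported with pyGetD; under Pre_ (every row has at
-- least grid.length entries) every index is in range, so pyGetD is exact there (Python raises
-- IndexError exactly on the inputs Pre_ excludes).
def getSubGridSumPort (grid : List (List Int)) (x y gridLength : Int) : Int :=
  if gridLength = 1 then PySem.List.pyGetD (PySem.List.pyGetD grid x []) y 0
  else
    (PySem.List.pyRange y (y + gridLength)).foldl (fun mySum j =>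
      (PySem.List.pyRange x (x + gridLength)).foldl (fun mySum i =>
        mySum + PySem.List.pyGetD (PySem.List.pyGetD grid i []) j 0) mySum) 0

def largestSubgrid (grid : List (List Int)) (maxSum : Int) : Int :=
  -- state = (greatestBelowMaxSum, mySubGridLen)
  let gridLength : Int := grid.length
  ((PySem.List.pyRange 1 (gridLength + 1)).foldl (fun st subGridLen =>
    (PySem.List.pyRange 0 (gridLength + 1 - subGridLen)).foldl (fun st i =>
      (PySem.List.pyRange 0 (gridLength + 1 - subGridLen)).foldl (fun st j =>
        let subGridSum := getSubGridSumPort grid i j subGridLen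
        if st.1 ≤ subGridSum ∧ subGridSum ≤ maxSum then (subGridSum, subGridLen) else st)
      st) st) ((0 : Int), (0 : Int))).2

-- ===== PORT B =====
-- rp = [0]; s = 0; for v in row[:n]: s += v; rp.append(s)
def pvAltRowPref (n : Nat) (row : List Int) : List Int :=
  ((row.take n).foldl (fun p v => (p.1 + v, p.2 ++ [p.1 + v])) ((0 : Int), [(0 : Int)])).2

-- pref = [[0]*(n+1)]; for row in grid: pref.append([a+b for a,b in zip(pref[-1], rp)])
def pvAltPref (grid : List (List Int)) (n : Nat) : List (List Int) :=
  grid.foldl (fun pref row =>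
    pref ++ [List.zipWith (· + ·) (pref.getLastD []) (pvAltRowPref n row)])
    [List.replicate (n + 1) (0 : Int)]

-- pref[i][j] (all lookups in range, so pyGetD is exact)
def pvAltGet (pref : List (List Int)) (i j : Int) : Int :=
  PySem.List.pyGetD (PySem.List.pyGetD pref i []) j 0

def largestSubgrid_alt (grid : List (List Int)) (maxSum : Int) : Int :=
  let n : Int := grid.length
  let pref := pvAltPref grid grid.length
  ((PySem.List.pyRange 1 (n + 1)).foldl (fun st L =>
    (PySem.List.pyRange 0 (n + 1 - L)).foldl (fun st i =>
      (PySem.List.pyRange 0 (n + 1 - L)).foldl (fun st j =>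
        let s := pvAltGet pref (i + L) (j + L) - pvAltGet pref i (j + L)
                 - pvAltGet pref (i + L) j + pvAltGet pref i j
        if st.1 ≤ s ∧ s ≤ maxSum then (s, L) else st)
      st) st) ((0 : Int), (0 : Int))).2

-- ===== PRECONDITION & SPEC =====
-- Pre_ excludes exactly the inputs where Python A raises IndexError: some row shorter than the
-- number of rows (A reads grid[i][j] for all i, j < len(grid)).
def Pre_largestSubgrid (grid : List (List Int)) (maxSum : Int) : Prop :=
  ∀ row ∈ grid, grid.length ≤ row.length

instance (grid : List (List Int)) (maxSum : Int) : Decidable (Pre_largestSubgrid grid maxSum) := by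
  unfold Pre_largestSubgrid; infer_instance

def pvWitness_largestSubgrid : List (List Int) × Int := ([[1, 2], [3, 4]], 6)

def Spec_largestSubgrid (grid : List (List Int)) (maxSum : Int) (out : Int) : Prop := out = largestSubgrid_alt grid maxSum
instance (grid : List (List Int)) (maxSum : Int) (out : Int) : Decidable (Spec_largestSubgrid grid maxSum out) := by unfold Spec_largestSubgrid; infer_instance

-- ===== CLAIM (what is proved, stated in full; the proofs are below) =====
def Claim_equal_largestSubgrid : Prop := ∀ (grid : List (List Int)) (maxSum : Int), Dom_largestSubgrid grid maxSum → Pre_largestSubgrid grid maxSum → Spec_largestSubgrid grid maxSum (largestSubgrid grid maxSum)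

-- ===== LEMMAS AND PROOFS =====

-- Sg grid a b = sum of the top-left a×b corner of the grid.
def pvSg (grid : List (List Int)) (a b : Nat) : Int :=
  ((grid.take a).map (fun row => (row.take b).sum)).sum

theorem pvSumSub {α : Type} (l : List α) (f g : α → Int) :
    (l.map f).sum - (l.map g).sum = (l.map (fun i => f i - g i)).sum := by
  induction l with
  | nil => simp
  | cons a t ih => simp only [List.map_cons, List.sum_cons, ← ih]; ring

-- The scan loop of B builds the running-prefix list.
theorem pvRowLoop (xs : List Int) (s : Int) (acc : List Int) :
    (xs.foldl (fun p v => (p.1 + v, p.2 ++ [p.1 + v])) (s, acc)).2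
      = acc ++ (List.range xs.length).map (fun k => s + (xs.take (k + 1)).sum) := by
  induction xs generalizing s acc with
  | nil => simp
  | cons x t ih =>
    simp only [List.foldl_cons, ih, List.length_cons, List.range_succ_eq_map, List.map_cons,
      List.map_map]
    simp [List.append_assoc, Function.comp]
    intro a _
    ring

theorem pvRowPref_eq (n : Nat) (row : List Int) (h : n ≤ row.length) :
    pvAltRowPref n row = (List.range (n + 1)).map (fun b => ((row.take b).sum)) := by
  unfold pvAltRowPref
  rw [pvRowLoop, List.length_take_of_le h, List.range_succ_eq_map, List.map_cons]
  simp only [List.take_zero, List.sum_nil, List.map_map, List.singleton_append]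
  congr 1
  apply List.map_congr_left
  intro k hk
  simp only [Function.comp, Nat.succ_eq_add_one, List.take_take, zero_add]
  rw [min_eq_left (by simpa using List.mem_range.mp hk)]

-- Characterization of the prefix table: row a, column b holds pvSg grid a b.
theorem pvPref_eq (grid : List (List Int)) (n : Nat)
    (h : ∀ row ∈ grid, n ≤ row.length) :
    pvAltPref grid n
      = (List.range (grid.length + 1)).map
          (fun a => (List.range (n + 1)).map (fun b => pvSg grid a b)) := by
  induction grid using List.reverseRecOn with
  | nil =>
    simp only [pvAltPref, List.foldl_nil, List.length_nil, Nat.zero_add, List.range_succ_eq_map,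
      List.map_cons, List.map_map]
    simp [pvSg, Function.comp_def, List.map_const', List.replicate_succ]
  | append_singleton gs r ih =>
    have hgs : ∀ row ∈ gs, n ≤ row.length := fun row hw => h row (List.mem_append_left _ hw)
    have hr : n ≤ r.length := h r (by simp)
    have step : pvAltPref (gs ++ [r]) n
        = pvAltPref gs n ++ [List.zipWith (· + ·) ((pvAltPref gs n).getLastD []) (pvAltRowPref n r)] := by
      unfold pvAltPref
      rw [List.foldl_append]
      rfl
    rw [step, ih hgs]
    have hsplit : ((List.range (gs.length + 1)).map
        (fun a => (List.range (n + 1)).map (fun b => pvSg gs a b)))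
        = ((List.range gs.length).map (fun a => (List.range (n + 1)).map (fun b => pvSg gs a b)))
          ++ [(List.range (n + 1)).map (fun b => pvSg gs gs.length b)] := by
      rw [show List.range (gs.length + 1) = List.range gs.length ++ [gs.length] from List.range_succ,
        List.map_append, List.map_cons, List.map_nil]
    have hlast : ((List.range (gs.length + 1)).map
        (fun a => (List.range (n + 1)).map (fun b => pvSg gs a b))).getLastD []
        = (List.range (n + 1)).map (fun b => pvSg gs gs.length b) := by
      rw [hsplit, List.getLastD_concat]
    rw [hlast, pvRowPref_eq n r hr]
    have hz : List.zipWith (· + ·) ((List.range (n + 1)).map (fun b => pvSg gs gs.length b))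
        ((List.range (n + 1)).map (fun b => (r.take b).sum))
        = (List.range (n + 1)).map (fun b => pvSg gs gs.length b + (r.take b).sum) := by
      rw [List.zipWith_map, List.zipWith_self]
    rw [hz]
    have hlen : (gs ++ [r]).length + 1 = (gs.length + 1) + 1 := by simp
    rw [hlen, show List.range (gs.length + 1 + 1) = List.range (gs.length + 1) ++ [gs.length + 1]
      from List.range_succ, List.map_append]
    congr 1
    · apply List.map_congr_left
      intro a ha
      have ha' : a ≤ gs.length := by
        have := List.mem_range.mp ha; omega
      apply List.map_congr_left
      intro b _
      unfold pvSg
      rw [List.take_append_of_le_length ha']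
    · simp only [List.map_cons, List.map_nil]
      congr 1
      apply List.map_congr_left
      intro b _
      unfold pvSg
      have : (gs ++ [r]).take (gs.length + 1) = gs ++ [r] := by
        apply List.take_of_length_le; simp
      rw [this, List.map_append, List.sum_append,
        List.take_of_length_le (le_refl gs.length)]
      simp

-- Looking up the table = pvSg (indices in range).
theorem pvAltGet_eq (grid : List (List Int)) (n : Nat)
    (h : ∀ row ∈ grid, n ≤ row.length) (hn : n = grid.length)
    (a b : Nat) (ha : a ≤ grid.length) (hb : b ≤ n) :
    pvAltGet (pvAltPref grid n) (a : Int) (b : Int) = pvSg grid a b := by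
  unfold pvAltGet
  rw [pvPref_eq grid n h]
  rw [PySem.List.pyGetD_of_nonneg _ _ (by positivity), PySem.List.pyGetD_of_nonneg _ _ (by positivity)]
  simp only [Int.toNat_natCast]
  rw [PySem.List.getD_map_range _ _ _ _ (by omega), PySem.List.getD_map_range _ _ _ _ (by omega)]

-- A slice of a list as getD over a range of indices.
theorem pvSlice_eq {α : Type} [Inhabited α] (l : List α) (x L : Nat) (h : x + L ≤ l.length) (d : α) :
    (l.drop x).take L = (List.range L).map (fun i => l.getD (x + i) d) := by
  apply List.ext_getElem
  · simp; omega
  · intro i h1 h2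
    have hi : i < L := by simpa using h2
    have hx : x + i < l.length := by omega
    simp only [List.getElem_take, List.getElem_drop, List.getD_eq_getElem?_getD,
      List.getElem?_eq_getElem hx, List.getElem_map, List.getElem_range]
    rfl

-- Telescoping the prefix sums: the double difference is the subgrid sum.
theorem pvSg_diff (grid : List (List Int)) (x y L : Nat)
    (hx : x + L ≤ grid.length) (hy : ∀ row ∈ grid, y + L ≤ row.length) :
    pvSg grid (x + L) (y + L) - pvSg grid x (y + L) - pvSg grid (x + L) y + pvSg grid x y
      = ((List.range L).map (fun i => ((List.range L).map (fun j =>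
          ((grid.getD (x + i) []).getD (y + j) 0))).sum)).sum := by
  have tel : ∀ b : Nat, pvSg grid (x + L) b - pvSg grid x b
      = (((grid.drop x).take L).map (fun row => (row.take b).sum)).sum := by
    intro b
    unfold pvSg
    rw [List.take_add, List.map_append, List.sum_append]
    ring
  have : pvSg grid (x + L) (y + L) - pvSg grid x (y + L) - pvSg grid (x + L) y + pvSg grid x y
      = (((grid.drop x).take L).map (fun row => (row.take (y + L)).sum)).sum
        - (((grid.drop x).take L).map (fun row => (row.take y).sum)).sum := by
    rw [← tel, ← tel]; ring
  rw [this, pvSlice_eq grid x L hx [], List.map_map, List.map_map, pvSumSub]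
  apply congrArg List.sum
  apply List.map_congr_left
  intro i hi
  simp only [Function.comp]
  have hxi : x + i < grid.length := by
    have := List.mem_range.mp hi; omega
  have hrow : y + L ≤ (grid.getD (x + i) []).length := by
    apply hy
    rw [List.getD_eq_getElem?_getD, List.getElem?_eq_getElem hxi]
    exact List.getElem_mem _
  set r := grid.getD (x + i) [] with hr
  have htele : (r.take (y + L)).sum - (r.take y).sum = (((r.drop y).take L)).sum := by
    rw [List.take_add, List.sum_append]; ring
  rw [htele, pvSlice_eq r y L hrow 0]

-- A's double loop computes the same subgrid sum (loops run j outer, i inner; sums commute).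
theorem pvLoopSum (grid : List (List Int)) (x y L : Nat) (hL : 1 ≤ L)
    (hx : x + L ≤ grid.length) (hy : ∀ row ∈ grid, y + L ≤ row.length) :
    getSubGridSumPort grid (x : Int) (y : Int) (L : Int)
      = pvSg grid (x + L) (y + L) - pvSg grid x (y + L) - pvSg grid (x + L) y + pvSg grid x y := by
  rw [pvSg_diff grid x y L hx hy]
  have hrange : ∀ a : Int, PySem.List.pyRange a (a + (L : Int))
      = (List.range L).map (fun k : Nat => a + (k : Int)) := by
    intro a
    rw [PySem.List.pyRange_one, add_sub_cancel_left, Int.toNat_natCast]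
  have hloop : ∀ (s a b : Int),
      (PySem.List.pyRange a (a + (L : Int))).foldl
        (fun t i => t + PySem.List.pyGetD (PySem.List.pyGetD grid i []) b 0) s
      = s + ((List.range L).map
          (fun k : Nat => PySem.List.pyGetD (PySem.List.pyGetD grid (a + (k : Int)) []) b 0)).sum := by
    intro s a b
    rw [PySem.List.foldl_add, hrange, List.map_map]
    rfl
  have main : (PySem.List.pyRange (y : Int) ((y : Int) + (L : Int))).foldl (fun mySum j =>
        (PySem.List.pyRange (x : Int) ((x : Int) + (L : Int))).foldl (fun mySum i =>
          mySum + PySem.List.pyGetD (PySem.List.pyGetD grid i []) j 0) mySum) 0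
      = ((List.range L).map (fun j => ((List.range L).map (fun i =>
          ((grid.getD (x + i) []).getD (y + j) 0))).sum)).sum := by
    rw [PySem.List.foldl_congr_mem _ _
        (fun t j => t + ((List.range L).map
          (fun k : Nat => PySem.List.pyGetD (PySem.List.pyGetD grid ((x : Int) + (k : Int)) []) j 0)).sum) _
        (fun acc j _ => hloop acc (x : Int) j)]
    rw [PySem.List.foldl_add, hrange, List.map_map, zero_add]
    apply congrArg List.sum
    apply List.map_congr_left
    intro j _
    simp only [Function.comp]
    apply congrArg List.sum
    apply List.map_congr_left
    intro i _
    rw [PySem.List.pyGetD_of_nonneg _ _ (by positivity),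
        PySem.List.pyGetD_of_nonneg _ _ (by positivity)]
    congr 1
  have hfin : getSubGridSumPort grid (x : Int) (y : Int) (L : Int)
      = ((List.range L).map (fun j => ((List.range L).map (fun i =>
          ((grid.getD (x + i) []).getD (y + j) 0))).sum)).sum := by
    unfold getSubGridSumPort
    by_cases h1 : (L : Int) = 1
    · have hL1 : L = 1 := by omega
      subst hL1
      rw [if_pos h1, ← main]
      simp only [Nat.cast_one]
      rw [PySem.List.pyRange_one_singleton, PySem.List.pyRange_one_singleton]
      simp only [List.foldl_cons, List.foldl_nil, zero_add]
    · rw [if_neg h1]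
      exact main
  rw [hfin]
  have swap : ∀ (F : Nat → Nat → Int),
      ((List.range L).map (fun j => ((List.range L).map (fun i => F i j)).sum)).sum
        = ((List.range L).map (fun i => ((List.range L).map (fun j => F i j)).sum)).sum := by
    intro F
    show (∑ j ∈ Finset.range L, ∑ i ∈ Finset.range L, F i j)
        = ∑ i ∈ Finset.range L, ∑ j ∈ Finset.range L, F i j
    exact Finset.sum_comm
  exact swap _

-- ===== VERDICT (by name: the statement is the Claim_ definition above) =====
theorem largestSubgrid_spec : Claim_equal_largestSubgrid := by
  intro grid maxSum _ hpre
  unfold Spec_largestSubgrid largestSubgrid largestSubgrid_alt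
  simp only []
  congr 1
  apply PySem.List.foldl_congr_mem
  intro st1 L hL
  obtain ⟨hL1, hL2⟩ := PySem.List.mem_pyRange_one.mp hL
  apply PySem.List.foldl_congr_mem
  intro st2 i hi
  obtain ⟨hi1, hi2⟩ := PySem.List.mem_pyRange_one.mp hi
  apply PySem.List.foldl_congr_mem
  intro st3 j hj
  obtain ⟨hj1, hj2⟩ := PySem.List.mem_pyRange_one.mp hj
  -- reduce to equality of the two subgrid sums
  have key : getSubGridSumPort grid i j L
      = pvAltGet (pvAltPref grid grid.length) (i + L) (j + L)
        - pvAltGet (pvAltPref grid grid.length) i (j + L)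
        - pvAltGet (pvAltPref grid grid.length) (i + L) j
        + pvAltGet (pvAltPref grid grid.length) i j := by
    obtain ⟨x, rfl⟩ : ∃ x : Nat, i = (x : Int) := ⟨i.toNat, by omega⟩
    obtain ⟨y, rfl⟩ : ∃ y : Nat, j = (y : Int) := ⟨j.toNat, by omega⟩
    obtain ⟨K, rfl⟩ : ∃ K : Nat, L = (K : Int) := ⟨L.toNat, by omega⟩
    have hK : 1 ≤ K := by omega
    have hxK : x + K ≤ grid.length := by omega
    have hyK : y + K ≤ grid.length := by omega
    have hy' : ∀ row ∈ grid, y + K ≤ row.length := fun row hw => le_trans hyK (hpre row hw)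
    rw [pvLoopSum grid x y K hK hxK hy']
    rw [show ((x : Int) + (K : Int)) = ((x + K : Nat) : Int) by push_cast; ring,
        show ((y : Int) + (K : Int)) = ((y + K : Nat) : Int) by push_cast; ring]
    rw [pvAltGet_eq grid grid.length hpre rfl (x + K) (y + K) hxK (by omega),
        pvAltGet_eq grid grid.length hpre rfl x (y + K) (by omega) (by omega),
        pvAltGet_eq grid grid.length hpre rfl (x + K) y hxK (by omega),
        pvAltGet_eq grid grid.length hpre rfl x y (by omega) (by omega)]
  rw [key]
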